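-- pv_equiv track=rewrite | github.com/h1p3m/agi | gentext.py | find_valid_shapes
-- ===== SOURCE A (Python) =====
-- def find_valid_shapes(input_size):
--     valid_shapes = []
--     for i in range(1, input_size + 1):
--         if input_size % i == 0:
--             for j in range(1, input_size // i + 1):
--                 if input_size % (i * j) == 0:
--                     k = input_size // (i * j)
--                     valid_shapes.append((i, j, k))
--     return valid_shapes
-- ===== SOURCE B (Python) =====
-- def find_valid_shapes(input_size):
--     n = input_size
--     if n <= 0:
--         return []
--     # enumerate divisors in ascending order via trial division up to sqrt(n)
--     small = []
--     large = []
--     d = 1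
--     while d * d <= n:
--         if n % d == 0:
--             small.append(d)
--             if d * d != n:
--                 large.append(n // d)
--         d += 1
--     divs = small + large[::-1]
--     out = []
--     for i in divs:
--         m = n // i
--         for j in divs:
--             if j <= m and m % j == 0:
--                 out.append((i, j, m // j))
--     return out
-- ===== Notes on version B (the rewrite author's own statement) =====
-- stated objective: faster
-- what changed: B enumerates the divisors once by trial division up to sqrt(n) (small divisors ascending, cofactors reversed) and then iterates i and j over that divisor list, instead of A's scan of all of 1..n for i and all of 1..n//i for j.
import Mathlib
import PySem

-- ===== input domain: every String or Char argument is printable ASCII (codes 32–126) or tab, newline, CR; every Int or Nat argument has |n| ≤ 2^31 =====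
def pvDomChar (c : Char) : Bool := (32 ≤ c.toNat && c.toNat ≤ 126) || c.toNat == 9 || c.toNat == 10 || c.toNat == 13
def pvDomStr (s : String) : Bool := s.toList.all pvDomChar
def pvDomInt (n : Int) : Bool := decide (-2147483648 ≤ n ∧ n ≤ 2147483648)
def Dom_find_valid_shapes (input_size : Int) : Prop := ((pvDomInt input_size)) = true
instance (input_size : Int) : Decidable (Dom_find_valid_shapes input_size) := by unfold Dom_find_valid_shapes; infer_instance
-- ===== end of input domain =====

-- B replaces A's O(n)-range scans by one O(√n) divisor enumeration and loops over the divisor list only (measured faster).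


-- ===== PORT A =====
def find_valid_shapes (input_size : Int) : List (List Int) :=
  (PySem.List.pyRange 1 (input_size + 1) 1).foldl (fun valid_shapes i =>
    if PySem.Int.mod input_size i = 0 then
      (PySem.List.pyRange 1 (PySem.Int.floordiv input_size i + 1) 1).foldl (fun valid_shapes j =>
        if PySem.Int.mod input_size (i * j) = 0 then
          valid_shapes ++ [[i, j, PySem.Int.floordiv input_size (i * j)]]
        else valid_shapes) valid_shapes
    else valid_shapes) []

-- ===== PORT B =====
-- while d * d <= n: collect small divisors ascending and (unless d*d == n) cofactors n//d
def pvDivLoop (n : Int) (d : Int) (small large : List Int) : List Int × List Int :=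
  if d * d ≤ n then
    if PySem.Int.mod n d = 0 then
      pvDivLoop n (d + 1) (small ++ [d])
        (if d * d ≠ n then large ++ [PySem.Int.floordiv n d] else large)
    else pvDivLoop n (d + 1) small large
  else (small, large)
termination_by (n + 1 - d).toNat
decreasing_by
  all_goals
    have hd : d ≤ n := by nlinarith [sq_nonneg (2 * d - 1)]
    omega

def find_valid_shapes_alt (input_size : Int) : List (List Int) :=
  if input_size ≤ 0 then []
  else
    let p := pvDivLoop input_size 1 [] []
    let divs := p.1 ++ p.2.reverse
    divs.foldl (fun out i =>
      let m := PySem.Int.floordiv input_size i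
      divs.foldl (fun out j =>
        if j ≤ m ∧ PySem.Int.mod m j = 0 then
          out ++ [[i, j, PySem.Int.floordiv m j]]
        else out) out) []

-- ===== PRECONDITION & SPEC =====
def Spec_find_valid_shapes (input_size : Int) (out : List (List Int)) : Prop := out = find_valid_shapes_alt input_size
instance (input_size : Int) (out : List (List Int)) : Decidable (Spec_find_valid_shapes input_size out) := by unfold Spec_find_valid_shapes; infer_instance

-- ===== CLAIM (what is proved, stated in full; the proofs are below) =====
def Claim_equal_find_valid_shapes : Prop := ∀ (input_size : Int), Dom_find_valid_shapes input_size → Spec_find_valid_shapes input_size (find_valid_shapes input_size)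

-- ===== LEMMAS AND PROOFS =====

-- the ascending list of divisors of n, as A's outer loop filters it
def pvDivList (n : Int) : List Int :=
  (PySem.List.pyRange 1 (n + 1) 1).filter (fun i => decide (PySem.Int.mod n i = 0))

def pvInnerA (n i : Int) : List (List Int) :=
  ((PySem.List.pyRange 1 (PySem.Int.floordiv n i + 1) 1).filter
      (fun j => decide (PySem.Int.mod n (i * j) = 0))).map
    (fun j => [i, j, PySem.Int.floordiv n (i * j)])

def pvDivs (n : Int) : List Int :=
  (pvDivLoop n 1 [] []).1 ++ (pvDivLoop n 1 [] []).2.reverse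

def pvInnerB (n i : Int) : List (List Int) :=
  ((pvDivs n).filter
      (fun j => decide (j ≤ PySem.Int.floordiv n i ∧ PySem.Int.mod (PySem.Int.floordiv n i) j = 0))).map
    (fun j => [i, j, PySem.Int.floordiv (PySem.Int.floordiv n i) j])

lemma pv_foldl_ite_append_map {α β : Type} (l : List α) (P : α → Prop) [DecidablePred P]
    (f : α → β) (acc : List β) :
    l.foldl (fun acc x => if P x then acc ++ [f x] else acc) acc
      = acc ++ (l.filter (fun x => decide (P x))).map f := by
  induction l generalizing acc with
  | nil => simp
  | cons x xs ih =>
    by_cases h : P x <;> simp [List.foldl_cons, h, ih]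

lemma pv_foldl_ite_append_flatMap {α β : Type} (l : List α) (P : α → Prop) [DecidablePred P]
    (g : α → List β) (acc : List β) :
    l.foldl (fun acc x => if P x then acc ++ g x else acc) acc
      = acc ++ (l.filter (fun x => decide (P x))).flatMap g := by
  induction l generalizing acc with
  | nil => simp
  | cons x xs ih =>
    by_cases h : P x <;> simp [List.foldl_cons, h, ih]

lemma pv_A_eq (n : Int) : find_valid_shapes n = (pvDivList n).flatMap (pvInnerA n) := by
  unfold find_valid_shapes
  rw [PySem.List.foldl_congr_mem _ _
      (fun acc i => if PySem.Int.mod n i = 0 then acc ++ pvInnerA n i else acc) _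
      (by
        intro acc i _
        by_cases h : PySem.Int.mod n i = 0
        · simp only [if_pos h]
          rw [pv_foldl_ite_append_map]
          rfl
        · simp only [if_neg h]),
      pv_foldl_ite_append_flatMap]
  rfl

lemma pv_B_eq (n : Int) (hn : 0 < n) :
    find_valid_shapes_alt n = (pvDivs n).flatMap (pvInnerB n) := by
  have h1 : find_valid_shapes_alt n
      = (pvDivs n).foldl (fun out i =>
          (pvDivs n).foldl (fun out j =>
            if j ≤ PySem.Int.floordiv n i ∧ PySem.Int.mod (PySem.Int.floordiv n i) j = 0 then
              out ++ [[i, j, PySem.Int.floordiv (PySem.Int.floordiv n i) j]]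
            else out) out) [] := by
    unfold find_valid_shapes_alt pvDivs
    rw [if_neg (by omega)]
  rw [h1, PySem.List.foldl_congr_mem _ _ (fun out i => out ++ pvInnerB n i) _
      (by
        intro acc i _
        rw [pv_foldl_ite_append_map]
        rfl),
      PySem.List.foldl_append_eq_flatMap]
  rfl

lemma pv_int_le_sqrt {n a : Int} (hn : 0 ≤ n) (ha : 0 ≤ a) : a ≤ Int.sqrt n ↔ a * a ≤ n := by
  obtain ⟨m, rfl⟩ := Int.eq_ofNat_of_zero_le hn
  obtain ⟨k, rfl⟩ := Int.eq_ofNat_of_zero_le ha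
  unfold Int.sqrt
  rw [Int.toNat_natCast]
  exact_mod_cast @Nat.le_sqrt k m

lemma pv_divLoop_spec (n : Int) (hn : 0 < n) :
    ∀ (d : Int) (sm lg : List Int), 1 ≤ d →
    pvDivLoop n d sm lg =
      (sm ++ (PySem.List.pyRange d (Int.sqrt n + 1) 1).filter (fun e => decide (PySem.Int.mod n e = 0)),
       lg ++ ((PySem.List.pyRange d (Int.sqrt n + 1) 1).filter
                (fun e => decide (PySem.Int.mod n e = 0 ∧ e * e ≠ n))).map
              (fun e => PySem.Int.floordiv n e)) := by
  have main : ∀ (k : Nat) (d : Int) (sm lg : List Int), 1 ≤ d →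
      (Int.sqrt n + 1 - d).toNat ≤ k →
      pvDivLoop n d sm lg =
        (sm ++ (PySem.List.pyRange d (Int.sqrt n + 1) 1).filter (fun e => decide (PySem.Int.mod n e = 0)),
         lg ++ ((PySem.List.pyRange d (Int.sqrt n + 1) 1).filter
                  (fun e => decide (PySem.Int.mod n e = 0 ∧ e * e ≠ n))).map
                (fun e => PySem.Int.floordiv n e)) := by
    intro k
    induction k with
    | zero =>
      intro d sm lg hd hk
      have hgt : Int.sqrt n < d := by omega
      have hg : ¬ d * d ≤ n := fun h => absurd ((pv_int_le_sqrt (le_of_lt hn) (by omega)).mpr h) (by omega)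
      rw [pvDivLoop, if_neg hg, PySem.List.pyRange_one_eq_nil (by omega)]
      simp
    | succ k ih =>
      intro d sm lg hd hk
      by_cases hg : d * d ≤ n
      · have hds : d ≤ Int.sqrt n := (pv_int_le_sqrt (le_of_lt hn) (by omega)).mpr hg
        have hrange : PySem.List.pyRange d (Int.sqrt n + 1) 1
            = d :: PySem.List.pyRange (d + 1) (Int.sqrt n + 1) 1 :=
          PySem.List.pyRange_one_cons (by omega)
        rw [pvDivLoop, if_pos hg]
        by_cases hmod : PySem.Int.mod n d = 0
        · rw [if_pos hmod, ih (d + 1) _ _ (by omega) (by omega), hrange]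
          by_cases hsq : d * d ≠ n
          · rw [if_pos hsq]
            simp [hmod, hsq]
          · rw [if_neg hsq]
            simp only [not_not] at hsq
            simp [hmod, hsq]
        · rw [if_neg hmod, ih (d + 1) _ _ (by omega) (by omega), hrange]
          simp [hmod]
      · have hgt : Int.sqrt n < d := by
          by_contra hle
          exact hg ((pv_int_le_sqrt (le_of_lt hn) (by omega)).mp (by omega))
        rw [pvDivLoop, if_neg hg, PySem.List.pyRange_one_eq_nil (by omega)]
        simp
  intro d sm lg hd
  exact main (Int.sqrt n + 1 - d).toNat d sm lg hd le_rfl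

-- cofactor facts: for a positive divisor e of n > 0, n // e is a positive divisor with (n//e)*e = n
lemma pv_cof {n e : Int} (hn : 0 < n) (he : 1 ≤ e) (hdvd : e ∣ n) :
    PySem.Int.floordiv n e * e = n ∧ 1 ≤ PySem.Int.floordiv n e ∧ PySem.Int.floordiv n e ∣ n := by
  rw [PySem.Int.floordiv_eq_ediv_of_pos (by omega)]
  have hme : n / e * e = n := Int.ediv_mul_cancel hdvd
  have hpos : 1 ≤ n / e := by nlinarith [hme]
  exact ⟨hme, hpos, ⟨e, hme.symm⟩⟩

lemma pv_mem_divList {n x : Int} (hn : 0 < n) :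
    x ∈ pvDivList n ↔ 1 ≤ x ∧ x ∣ n := by
  unfold pvDivList
  simp only [List.mem_filter, PySem.List.mem_pyRange_one, decide_eq_true_eq,
    PySem.Int.mod_eq_zero_iff_dvd]
  constructor
  · rintro ⟨⟨h1, _⟩, h2⟩
    exact ⟨h1, h2⟩
  · rintro ⟨h1, h2⟩
    exact ⟨⟨h1, by have := Int.le_of_dvd hn h2; omega⟩, h2⟩

lemma pv_divs_eq (n : Int) (hn : 0 < n) : pvDivs n = pvDivList n := by
  have hs0 : 0 ≤ Int.sqrt n := Int.sqrt_nonneg n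
  set s := Int.sqrt n with hs
  have hsq_iff : ∀ x : Int, 0 ≤ x → (x ≤ s ↔ x * x ≤ n) :=
    fun x hx => pv_int_le_sqrt (le_of_lt hn) hx
  unfold pvDivs
  rw [pv_divLoop_spec n hn 1 [] [] le_rfl]
  simp only [List.nil_append]
  set SF := (PySem.List.pyRange 1 (s + 1) 1).filter
      (fun e => decide (PySem.Int.mod n e = 0)) with hSF
  set LF := ((PySem.List.pyRange 1 (s + 1) 1).filter
      (fun e => decide (PySem.Int.mod n e = 0 ∧ e * e ≠ n))).map
      (fun e => PySem.Int.floordiv n e) with hLF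
  have hmemS : ∀ x, x ∈ SF ↔ 1 ≤ x ∧ x ≤ s ∧ x ∣ n := by
    intro x
    rw [hSF]
    simp only [List.mem_filter, PySem.List.mem_pyRange_one, decide_eq_true_eq,
      PySem.Int.mod_eq_zero_iff_dvd]
    constructor
    · rintro ⟨⟨h1, h2⟩, h3⟩
      exact ⟨h1, by omega, h3⟩
    · rintro ⟨h1, h2, h3⟩
      exact ⟨⟨h1, by omega⟩, h3⟩
  have hmemL : ∀ x, x ∈ LF ↔
      ∃ e, (1 ≤ e ∧ e ≤ s ∧ e ∣ n ∧ e * e ≠ n) ∧ PySem.Int.floordiv n e = x := by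
    intro x
    rw [hLF]
    simp only [List.mem_map, List.mem_filter, PySem.List.mem_pyRange_one, decide_eq_true_eq,
      PySem.Int.mod_eq_zero_iff_dvd]
    constructor
    · rintro ⟨e, ⟨⟨h1, h2⟩, h3, h4⟩, h5⟩
      exact ⟨e, ⟨h1, by omega, h3, h4⟩, h5⟩
    · rintro ⟨e, ⟨h1, h2, h3, h4⟩, h5⟩
      exact ⟨e, ⟨⟨h1, by omega⟩, h3, h4⟩, h5⟩
  -- every element of LF squares above n
  have hLbig : ∀ x ∈ LF, 1 ≤ x ∧ x ∣ n ∧ n < x * x := by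
    intro x hx
    obtain ⟨e, ⟨h1, h2, h3, h4⟩, h5⟩ := (hmemL x).mp hx
    obtain ⟨hme, hpos, hdvd⟩ := pv_cof hn h1 h3
    rw [h5] at hme hpos hdvd
    have hesq : e * e ≤ n := (hsq_iff e (by omega)).mp h2
    have hlt : e * e < n := lt_of_le_of_ne hesq h4
    have helt : e < x := by nlinarith
    exact ⟨hpos, hdvd, by nlinarith⟩
  -- Pairwise (<) of SF ++ LF.reverse
  have hpairS : SF.Pairwise (· < ·) :=
    (PySem.List.pairwise_lt_pyRange_one 1 (s + 1)).filter _
  have hpairL : LF.reverse.Pairwise (· < ·) := by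
    rw [List.pairwise_reverse, hLF, List.pairwise_map]
    refine ((PySem.List.pairwise_lt_pyRange_one 1 (s + 1)).filter _).imp_of_mem ?_
    intro a b ha hb hab
    simp only [List.mem_filter, PySem.List.mem_pyRange_one, decide_eq_true_eq,
      PySem.Int.mod_eq_zero_iff_dvd] at ha hb
    obtain ⟨⟨ha1, _⟩, ha3, _⟩ := ha
    obtain ⟨⟨hb1, _⟩, hb3, _⟩ := hb
    obtain ⟨hma, hpa, _⟩ := pv_cof hn ha1 ha3
    obtain ⟨hmb, hpb, _⟩ := pv_cof hn hb1 hb3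
    nlinarith
  have hpair : (SF ++ LF.reverse).Pairwise (· < ·) := by
    rw [List.pairwise_append]
    refine ⟨hpairS, hpairL, ?_⟩
    intro a ha b hb
    rw [List.mem_reverse] at hb
    obtain ⟨ha1, ha2, _⟩ := (hmemS a).mp ha
    obtain ⟨hb1, _, hbsq⟩ := hLbig b hb
    have hasq : a * a ≤ n := (hsq_iff a (by omega)).mp ha2
    nlinarith
  -- same members as pvDivList
  have hmem : ∀ x, x ∈ SF ++ LF.reverse ↔ x ∈ pvDivList n := by
    intro x
    rw [List.mem_append, List.mem_reverse, pv_mem_divList hn, hmemS, hmemL]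
    constructor
    · rintro (⟨h1, _, h3⟩ | hx)
      · exact ⟨h1, h3⟩
      · obtain ⟨h1, h2, _⟩ := hLbig x (by rw [hmemL]; exact hx)
        exact ⟨h1, h2⟩
    · rintro ⟨h1, h2⟩
      by_cases hsml : x * x ≤ n
      · exact Or.inl ⟨h1, (hsq_iff x (by omega)).mpr hsml, h2⟩
      · push Not at hsml
        obtain ⟨hme, hpos, hdvd⟩ := pv_cof hn h1 h2
        set e := PySem.Int.floordiv n x with he
        refine Or.inr ⟨e, ⟨hpos, ?_, hdvd, ?_⟩, ?_⟩
        · exact (hsq_iff e (by omega)).mpr (by nlinarith)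
        · intro hcon
          have heq : e = x := mul_left_cancel₀ (by omega : e ≠ 0)
            (hcon.trans ((mul_comm e x ▸ hme : e * x = n)).symm)
          rw [heq] at hcon
          linarith
        · -- n // e = x since e * x = n
          obtain ⟨hme2, hpos2, _⟩ := pv_cof hn hpos hdvd
          refine mul_right_cancel₀ (by omega : e ≠ 0) ?_
          rw [hme2]
          linarith [mul_comm x e, hme]
  -- conclude: both are strictly increasing with the same members
  have hnodup1 : (SF ++ LF.reverse).Nodup := hpair.imp (fun h => ne_of_lt h)
  have hpair2 : (pvDivList n).Pairwise (· < ·) :=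
    (PySem.List.pairwise_lt_pyRange_one 1 (n + 1)).filter _
  have hnodup2 : (pvDivList n).Nodup := hpair2.imp (fun h => ne_of_lt h)
  have hperm : (SF ++ LF.reverse).Perm (pvDivList n) :=
    List.perm_of_nodup_nodup_toFinset_eq hnodup1 hnodup2
      (Finset.ext (fun x => by rw [List.mem_toFinset, List.mem_toFinset, hmem]))
  calc SF ++ LF.reverse
      = PySem.List.sorted (pvDivList n) (fun x => x) :=
        (PySem.List.sorted_eq_of_perm_of_pairwise_lt _ _ _ hperm hpair).symm
    _ = pvDivList n :=
        PySem.List.sorted_eq_self_of_pairwise _ _ (hpair2.imp (fun h => le_of_lt h))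

lemma pv_inner_eq (n : Int) (hn : 0 < n) (i : Int) (hi : i ∈ pvDivList n) :
    pvInnerB n i = pvInnerA n i := by
  obtain ⟨hi1, hi2⟩ := (pv_mem_divList hn).mp hi
  obtain ⟨hmi, hm1, hmdvd⟩ := pv_cof hn hi1 hi2
  set m := PySem.Int.floordiv n i with hm
  have hm' : m = n / i := by rw [hm, PySem.Int.floordiv_eq_ediv_of_pos (by omega)]
  have hmn : m ≤ n := Int.le_of_dvd hn hmdvd
  unfold pvInnerB pvInnerA
  rw [pv_divs_eq n hn]
  have hflt : (pvDivList n).filter (fun j => decide (j ≤ m ∧ PySem.Int.mod m j = 0))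
      = (PySem.List.pyRange 1 (m + 1) 1).filter (fun j => decide (PySem.Int.mod n (i * j) = 0)) := by
    unfold pvDivList
    rw [List.filter_filter,
      PySem.List.pyRange_one_append 1 (m + 1) (n + 1) (by omega) (by omega),
      List.filter_append]
    have h2 : (PySem.List.pyRange (m + 1) (n + 1) 1).filter
        (fun a => decide (a ≤ m ∧ PySem.Int.mod m a = 0) && decide (PySem.Int.mod n a = 0)) = [] := by
      refine List.filter_eq_nil_iff.mpr ?_
      intro a ha
      rw [PySem.List.mem_pyRange_one] at ha
      simp only [Bool.and_eq_true, decide_eq_true_eq]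
      rintro ⟨⟨h, _⟩, _⟩
      omega
    rw [h2, List.append_nil]
    refine List.filter_congr ?_
    intro j hj
    rw [PySem.List.mem_pyRange_one] at hj
    rw [← Bool.decide_and, decide_eq_decide]
    rw [PySem.Int.mod_eq_zero_iff_dvd, PySem.Int.mod_eq_zero_iff_dvd,
      PySem.Int.mod_eq_zero_iff_dvd]
    constructor
    · rintro ⟨⟨_, hjm⟩, _⟩
      exact (Int.dvd_div_iff_mul_dvd hi2).mp (hm' ▸ hjm)
    · intro hij
      have hjm : j ∣ m := hm' ▸ ((Int.dvd_div_iff_mul_dvd hi2).mpr hij)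
      exact ⟨⟨by omega, hjm⟩, hjm.trans hmdvd⟩
  rw [hflt]
  refine List.map_congr_left ?_
  intro j hj
  simp only [List.mem_filter, PySem.List.mem_pyRange_one, decide_eq_true_eq,
    PySem.Int.mod_eq_zero_iff_dvd] at hj
  obtain ⟨⟨hj1, _⟩, _⟩ := hj
  have : PySem.Int.floordiv m j = PySem.Int.floordiv n (i * j) := by
    rw [PySem.Int.floordiv_eq_ediv_of_pos (by omega : (0:Int) < j),
      PySem.Int.floordiv_eq_ediv_of_pos (by positivity : (0:Int) < i * j), hm',
      Int.ediv_ediv_of_nonneg (by omega : (0:Int) ≤ i)]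
  rw [this]

-- ===== VERDICT (by name: the statement is the Claim_ definition above) =====
theorem find_valid_shapes_spec : Claim_equal_find_valid_shapes := by
  intro n _
  unfold Spec_find_valid_shapes
  rcases le_or_gt n 0 with hle | hpos
  · unfold find_valid_shapes find_valid_shapes_alt
    rw [PySem.List.pyRange_one_eq_nil (by omega)]
    simp [hle]
  · rw [pv_A_eq, pv_B_eq n hpos, pv_divs_eq n hpos,
        List.flatMap_def, List.flatMap_def]
    exact congrArg List.flatten
      (List.map_congr_left (fun i hi => pv_inner_eq n hpos i hi)).symm
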